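-- pv_equiv track=rewrite | github.com/jrfdy6/aiclone | backend/app/services/workspace_snapshot_service.py | _parse_markdown_fields
-- ===== SOURCE A (Python) =====
-- def _clean_markdown_value(value: str) -> str:
--     cleaned = value.strip()
--     if cleaned.startswith("`") and cleaned.endswith("`"):
--         cleaned = cleaned[1:-1]
--     return "" if cleaned == "-" else cleaned
--
-- def _parse_markdown_fields(block: str) -> dict[str, str]:
--     fields: dict[str, str] = {}
--     current_key: str | None = None
--     for raw_line in block.splitlines():
--         line = raw_line.rstrip()
--         stripped = line.strip()
--         if stripped.startswith("- ") and ":" in stripped: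
--             key, value = stripped[2:].split(":", 1)
--             current_key = key.strip().lower()
--             fields[current_key] = _clean_markdown_value(value)
--             continue
--         if current_key and line.startswith("  ") and stripped:
--             existing = fields.get(current_key, "")
--             fields[current_key] = f"{existing}\n{stripped}".strip()
--     return fields
-- ===== SOURCE B (Python) =====
-- def _clean_markdown_value(value: str) -> str:
--     cleaned = value.strip()
--     if cleaned.startswith("`") and cleaned.endswith("`"):
--         cleaned = cleaned[1:-1]
--     return "" if cleaned == "-" else cleaned
--
--
-- def _parse_markdown_fields(block: str) -> dict[str, str]:
--     # Pass 1: partition the lines into records (header + its continuation lines).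
--     records: list[tuple[str, str, list[str]]] = []
--     current: tuple[str, str, list[str]] | None = None
--     for raw_line in block.splitlines():
--         line = raw_line.rstrip()
--         stripped = line.strip()
--         if stripped.startswith("- ") and ":" in stripped:
--             key, _, value = stripped[2:].partition(":")
--             current = (key.strip().lower(), _clean_markdown_value(value), [])
--             records.append(current)
--         elif current is not None and current[0] and line.startswith("  ") and stripped:
--             current[2].append(stripped)
--     # Pass 2: build the dict in record order (later duplicate keys overwrite).
--     fields: dict[str, str] = {}
--     for key, value, conts in records:
--         fields[key] = value if not conts else "\n".join([value] + conts).strip()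
--     return fields
-- ===== Notes on version B (the rewrite author's own statement) =====
-- stated objective: alternative
-- what changed: Replaces A's single stateful pass that mutates the dict incrementally (re-reading and re-stripping the stored value on every continuation line) with a two-phase decomposition: one pass partitions the lines into (key, value, continuations) records, then each record's value is produced once by a single join-and-strip and assigned in record order.
import Mathlib
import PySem

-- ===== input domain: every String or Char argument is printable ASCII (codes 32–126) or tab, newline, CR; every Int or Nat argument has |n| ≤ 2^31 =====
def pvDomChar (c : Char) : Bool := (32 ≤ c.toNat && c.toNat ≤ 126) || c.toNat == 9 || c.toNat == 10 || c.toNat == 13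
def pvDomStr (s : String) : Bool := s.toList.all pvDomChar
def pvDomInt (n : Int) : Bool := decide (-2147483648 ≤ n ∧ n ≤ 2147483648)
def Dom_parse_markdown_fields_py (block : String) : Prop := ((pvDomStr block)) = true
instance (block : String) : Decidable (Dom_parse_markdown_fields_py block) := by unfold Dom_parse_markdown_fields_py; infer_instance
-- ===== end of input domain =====

-- B replaces A's stateful dict-mutating single pass by a two-phase decomposition (partition lines
-- into records, then join each record's continuations once); alternative structure, same values.
-- ===== PORT A =====
-- Ports work on List Char (PySem.Chars) and wrap String.ofList at the end; exact per PySem on Dom.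
-- shared helper: both Pythons define the identical _clean_markdown_value
def pvCleanVal (value : List Char) : List Char :=
  let cleaned := PySem.Chars.strip value
  let cleaned :=
    if PySem.Chars.startswith cleaned ['`'] && PySem.Chars.endswith cleaned ['`'] then
      PySem.List.slice cleaned (some 1) (some (-1))
    else cleaned
  if cleaned = ['-'] then [] else cleaned

-- A's loop body: state = (fields, current_key); `if current_key` is Python truthiness (not None and not "").
-- `key, value = stripped[2:].split(":", 1)` is guarded by `":" in stripped`, so the split has exactly 2 parts;
-- headD reads them.
def pvStepA (st : PySem.Dict (List Char) (List Char) × Option (List Char)) (raw_line : List Char) :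
    PySem.Dict (List Char) (List Char) × Option (List Char) :=
  let line := PySem.Chars.rstrip raw_line
  let stripped := PySem.Chars.strip line
  if PySem.Chars.startswith stripped ['-', ' '] && PySem.Chars.isIn [':'] stripped then
    let parts := PySem.Chars.splitOnMax (PySem.List.slice stripped (some 2) none) [':'] 1
    let key := PySem.Chars.lower (PySem.Chars.strip (parts.headD []))
    (st.1.insert key (pvCleanVal ((parts.drop 1).headD [])), some key)
  else
    match st.2 with
    | some ck =>
      if ck ≠ [] ∧ PySem.Chars.startswith line [' ', ' '] = true ∧ stripped ≠ [] then
        (st.1.insert ck (PySem.Chars.strip (st.1.getD ck [] ++ '\n' :: stripped)), some ck)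
      else st
    | none => st

def parse_markdown_fields_py (block : String) : List (String × String) :=
  let res := (PySem.Chars.splitlines block.toList).foldl pvStepA (PySem.Dict.empty, none)
  res.1.items.map (fun p => (String.ofList p.1, String.ofList p.2))

-- ===== PORT B =====
-- B pass 1: partition lines into records (key, value, continuations); Python appends `current` to `records`
-- and mutates it in place, which is the HEAD of the reversed list here (reversed at the end).
-- str.partition(":") :
def pvPartitionColon (s : List Char) : List Char × List Char × List Char :=
  let i := PySem.Chars.find s [':']
  if i = -1 then (s, [], []) else (s.take i.toNat, [':'], s.drop (i.toNat + 1))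

def pvStepB (recs : List (List Char × List Char × List (List Char))) (raw_line : List Char) :
    List (List Char × List Char × List (List Char)) :=
  let line := PySem.Chars.rstrip raw_line
  let stripped := PySem.Chars.strip line
  if PySem.Chars.startswith stripped ['-', ' '] && PySem.Chars.isIn [':'] stripped then
    let p := pvPartitionColon (PySem.List.slice stripped (some 2) none)
    (PySem.Chars.lower (PySem.Chars.strip p.1), pvCleanVal p.2.2, []) :: recs
  else
    match recs with
    | (k, v, cs) :: rest =>
      if k ≠ [] ∧ PySem.Chars.startswith line [' ', ' '] = true ∧ stripped ≠ [] then
        (k, v, cs ++ [stripped]) :: rest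
      else recs
    | [] => recs

-- B pass 2 value: `value if not conts else "\n".join([value] + conts).strip()`
def pvJoinFin (v : List Char) (cs : List (List Char)) : List Char :=
  if cs = [] then v else PySem.Chars.strip (PySem.Chars.join ['\n'] (v :: cs))

def parse_markdown_fields_py_alt (block : String) : List (String × String) :=
  let records := ((PySem.Chars.splitlines block.toList).foldl pvStepB []).reverse
  let fields := records.foldl (fun d r => d.insert r.1 (pvJoinFin r.2.1 r.2.2))
      (PySem.Dict.empty : PySem.Dict (List Char) (List Char))
  fields.items.map (fun p => (String.ofList p.1, String.ofList p.2))

-- ===== PRECONDITION & SPEC =====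
def Spec_parse_markdown_fields_py (block : String) (out : List (String × String)) : Prop := out = parse_markdown_fields_py_alt block
instance (block : String) (out : List (String × String)) : Decidable (Spec_parse_markdown_fields_py block out) := by unfold Spec_parse_markdown_fields_py; infer_instance

-- ===== CLAIM (what is proved, stated in full; the proofs are below) =====
def Claim_equal_parse_markdown_fields_py : Prop := ∀ (block : String), Dom_parse_markdown_fields_py block → Spec_parse_markdown_fields_py block (parse_markdown_fields_py block)

-- ===== LEMMAS AND PROOFS =====

-- first-colon split of a line tail, used to characterize both A's split(":",1) and B's partition(":")

def pvT (s : List Char) : List Char := s.takeWhile (fun c => !(c == ':'))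
def pvR (s : List Char) : List Char := s.drop ((pvT s).length + 1)

lemma pvGo0 (l : List Char) (fuel : Nat) (acc : List (List Char)) :
    PySem.Chars.splitOnMax.go [':'] fuel 0 l [] acc = (l :: acc).reverse := by
  cases fuel with
  | zero => simp [PySem.Chars.splitOnMax.go]
  | succ n =>
    cases l with
    | nil => simp [PySem.Chars.splitOnMax.go]
    | cons c rest => simp [PySem.Chars.splitOnMax.go]

lemma pvGoSplit (s : List Char) : ∀ (fuel : Nat) (cur : List Char) (acc : List (List Char)),
    s.length < fuel →
    PySem.Chars.splitOnMax.go [':'] fuel 1 s cur acc =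
      (if ':' ∈ s
       then (pvR s :: (cur.reverse ++ pvT s) :: acc).reverse
       else ((cur.reverse ++ s) :: acc).reverse) := by
  induction s with
  | nil =>
    intro fuel cur acc h
    cases fuel with
    | zero => omega
    | succ n => simp [PySem.Chars.splitOnMax.go]
  | cons c rest ih =>
    intro fuel cur acc h
    cases fuel with
    | zero => omega
    | succ n =>
      by_cases hc : c = ':'
      · subst hc
        simp [PySem.Chars.splitOnMax.go, List.isPrefixOf, pvGo0, pvT, pvR]
      · have hih := ih n (c :: cur) acc (by simp at h; omega)
        have hpre : [':'].isPrefixOf (c :: rest) = false := by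
          simp [List.isPrefixOf]; exact fun hh => (hc hh.symm).elim
        simp only [PySem.Chars.splitOnMax.go, hpre, if_neg (Nat.one_ne_zero)]
        rw [hih]
        by_cases hm : ':' ∈ rest
        · simp [hm, pvT, pvR, hc]
        · simp [hm, pvT, hc]
          exact fun hh => (hc hh.symm).elim

lemma pvSplit1 (s : List Char) :
    PySem.Chars.splitOnMax s [':'] 1 =
      if ':' ∈ s then [pvT s, pvR s] else [s] := by
  have h := pvGoSplit s (s.length + 1) [] [] (by omega)
  simp only [PySem.Chars.splitOnMax]
  norm_num
  rw [h]
  by_cases hm : ':' ∈ s <;> simp [hm]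

lemma pvFindGo (s : List Char) : ∀ (k : Nat),
    PySem.Chars.find.go [':'] s k =
      (if ':' ∈ s then ((k : Int) + (pvT s).length) else -1) := by
  induction s with
  | nil => intro k; simp [PySem.Chars.find.go]
  | cons c rest ih =>
    intro k
    by_cases hc : c = ':'
    · subst hc; simp [PySem.Chars.find.go, List.isPrefixOf, pvT]
    · have hpre : [':'].isPrefixOf (c :: rest) = false := by
        simp [List.isPrefixOf]; exact fun hh => (hc hh.symm).elim
      simp only [PySem.Chars.find.go, hpre]
      rw [ih (k+1)]
      by_cases hm : ':' ∈ rest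
      · simp [hm, hc, pvT]; ring
      · simp [hm, hc, pvT]
        exact fun hh => (hc hh.symm).elim

def pvNice (c : List Char) : Prop :=
  c ≠ [] ∧ PySem.Chars.lstrip c = c ∧ PySem.Chars.rstrip c = c

lemma pvLstripIdem (s : List Char) :
    PySem.Chars.lstrip (PySem.Chars.lstrip s) = PySem.Chars.lstrip s := by
  simp [PySem.Chars.lstrip, List.dropWhile_idempotent]

lemma pvRstripIdem (s : List Char) :
    PySem.Chars.rstrip (PySem.Chars.rstrip s) = PySem.Chars.rstrip s := by
  simp [PySem.Chars.rstrip, List.dropWhile_idempotent]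

lemma pvLstripAppend (a b : List Char) :
    PySem.Chars.lstrip (a ++ b) =
      if PySem.Chars.lstrip a = [] then PySem.Chars.lstrip b
      else PySem.Chars.lstrip a ++ b := by
  simp [PySem.Chars.lstrip, List.dropWhile_append, List.isEmpty_iff]

lemma pvRstripAppend (a b : List Char) :
    PySem.Chars.rstrip (a ++ b) =
      if PySem.Chars.rstrip b = [] then PySem.Chars.rstrip a
      else a ++ PySem.Chars.rstrip b := by
  simp only [PySem.Chars.rstrip, List.reverse_append, List.dropWhile_append, List.isEmpty_iff]
  by_cases h : List.dropWhile PySem.Chars.isspace b.reverse = []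
  · simp [h]
  · have h2 : (List.dropWhile PySem.Chars.isspace b.reverse).reverse ≠ [] := by simpa using h
    simp [h, h2]

lemma pvLstripConsFalse {c : Char} (l : List Char) (h : PySem.Chars.isspace c = false) :
    PySem.Chars.lstrip (c :: l) = c :: l := by
  simp [PySem.Chars.lstrip, h]

lemma pvHeadFalse {c : Char} {l : List Char} (h : PySem.Chars.lstrip (c :: l) = c :: l) :
    PySem.Chars.isspace c = false := by
  by_contra hc
  have hc' : PySem.Chars.isspace c = true := by
    cases h2 : PySem.Chars.isspace c with
    | false => exact absurd h2 hc
    | true => rfl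
  have := List.length_dropWhile_le (p := PySem.Chars.isspace) (l := l)
  simp [PySem.Chars.lstrip, hc'] at h
  have := congrArg List.length h
  simp at this
  omega

lemma pvRstripPrefix (s : List Char) : PySem.Chars.rstrip s <+: s := by
  have := List.dropWhile_suffix (l := s.reverse) (PySem.Chars.isspace)
  rw [PySem.Chars.rstrip]
  have h2 := List.reverse_prefix.mpr (by simpa using this :
    (List.dropWhile PySem.Chars.isspace s.reverse) <:+ s.reverse)
  simpa using h2

lemma pvNiceStrip (line : List Char) (h : PySem.Chars.strip line ≠ []) :
    pvNice (PySem.Chars.strip line) := by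
  refine ⟨h, ?_, ?_⟩
  · -- lstrip (rstrip (lstrip line)) = itself
    have hy : PySem.Chars.lstrip (PySem.Chars.lstrip line) = PySem.Chars.lstrip line :=
      pvLstripIdem line
    have hpre : PySem.Chars.strip line <+: PySem.Chars.lstrip line := by
      simpa [PySem.Chars.strip] using pvRstripPrefix (PySem.Chars.lstrip line)
    obtain ⟨t, ht⟩ := hpre
    cases hz : PySem.Chars.strip line with
    | nil => exact absurd hz h
    | cons c z' =>
      have hy2 : PySem.Chars.lstrip line = c :: (z' ++ t) := by
        rw [← ht, hz]; simp
      have hcf : PySem.Chars.isspace c = false := pvHeadFalse (by rw [← hy2]; exact hy)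
      rw [hz] at *
      exact pvLstripConsFalse _ hcf
  · simpa [PySem.Chars.strip] using pvRstripIdem (PySem.Chars.lstrip line)

lemma pvStripAppendCons (x c : List Char) (hc : pvNice c) :
    PySem.Chars.strip (x ++ '\n' :: c) =
      if PySem.Chars.lstrip x = [] then c else PySem.Chars.lstrip x ++ '\n' :: c := by
  obtain ⟨hne, hl, hr⟩ := hc
  have hnl : PySem.Chars.lstrip ('\n' :: c) = c := by
    simpa [PySem.Chars.lstrip, (by decide : PySem.Chars.isspace '\n' = true)] using hl
  have hrc : PySem.Chars.rstrip ('\n' :: c) = '\n' :: c := by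
    have := pvRstripAppend ['\n'] c
    simp [hr, hne] at this
    simpa using this
  rw [PySem.Chars.strip, pvLstripAppend]
  by_cases hx : PySem.Chars.lstrip x = []
  · rw [if_pos hx, if_pos hx, hnl, hr]
  · rw [if_neg hx, if_neg hx, pvRstripAppend, hrc, if_neg (by simp)]

lemma pvLstripNewlineCons (z : List Char) :
    PySem.Chars.lstrip ('\n' :: z) = PySem.Chars.lstrip z := by
  simp [PySem.Chars.lstrip, (by decide : PySem.Chars.isspace '\n' = true)]

lemma pvLstripStripAppend (x c y : List Char) (hc : pvNice c) :
    PySem.Chars.lstrip (PySem.Chars.strip (x ++ '\n' :: c) ++ y) =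
      PySem.Chars.lstrip (x ++ '\n' :: c ++ y) := by
  obtain ⟨hne, hl, hr⟩ := hc
  rw [pvStripAppendCons x c ⟨hne, hl, hr⟩]
  have hL0 : PySem.Chars.lstrip (c ++ y) = c ++ y := by
    rw [pvLstripAppend, hl, if_neg hne]
  by_cases hx : PySem.Chars.lstrip x = []
  · rw [if_pos hx, hL0]
    have h2 : x ++ '\n' :: c ++ y = x ++ ('\n' :: (c ++ y)) := by simp
    rw [h2, pvLstripAppend, if_pos hx, pvLstripNewlineCons, hL0]
  · rw [if_neg hx]
    have h1 : PySem.Chars.lstrip x ++ '\n' :: c ++ y = (PySem.Chars.lstrip x) ++ ('\n' :: c ++ y) := by simp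
    have h2 : x ++ '\n' :: c ++ y = x ++ ('\n' :: c ++ y) := by simp
    have hL : PySem.Chars.lstrip (PySem.Chars.lstrip x ++ ('\n' :: c ++ y)) = PySem.Chars.lstrip x ++ ('\n' :: c ++ y) := by
      rw [pvLstripAppend, pvLstripIdem, if_neg hx]
    have hR : PySem.Chars.lstrip (x ++ ('\n' :: c ++ y)) = PySem.Chars.lstrip x ++ ('\n' :: c ++ y) := by
      rw [pvLstripAppend, if_neg hx]
    rw [h1, h2, hL, hR]

lemma pvStripStripAppend (x c y : List Char) (hc : pvNice c) :
    PySem.Chars.strip (PySem.Chars.strip (x ++ '\n' :: c) ++ y) =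
      PySem.Chars.strip (x ++ '\n' :: c ++ y) := by
  calc PySem.Chars.strip (PySem.Chars.strip (x ++ '\n' :: c) ++ y)
      = PySem.Chars.rstrip (PySem.Chars.lstrip (PySem.Chars.strip (x ++ '\n' :: c) ++ y)) := rfl
    _ = PySem.Chars.rstrip (PySem.Chars.lstrip (x ++ '\n' :: c ++ y)) := by
          rw [pvLstripStripAppend x c y hc]
    _ = PySem.Chars.strip (x ++ '\n' :: c ++ y) := rfl

lemma pvPartitionEq (s : List Char) :
    pvPartitionColon s = if ':' ∈ s then (pvT s, [':'], pvR s) else (s, [], []) := by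
  have hf : PySem.Chars.find s [':'] =
      (if ':' ∈ s then ((pvT s).length : Int) else -1) := by
    have := pvFindGo s 0
    simpa [PySem.Chars.find] using this
  by_cases hm : ':' ∈ s
  · have hT : s.take (pvT s).length = pvT s := by
      have hp : pvT s <+: s := List.takeWhile_prefix _
      simpa [pvT] using (List.prefix_iff_eq_take.mp hp).symm
    simp [pvPartitionColon, hf, hm, pvR, hT]
  · simp [pvPartitionColon, hf, hm]

-- the two header parses agree
lemma pvHeaderEq (s : List Char) :
    ((PySem.Chars.splitOnMax s [':'] 1).headD [],
      ((PySem.Chars.splitOnMax s [':'] 1).drop 1).headD []) =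
    ((pvPartitionColon s).1, (pvPartitionColon s).2.2) := by
  rw [pvSplit1, pvPartitionEq]
  by_cases hm : ':' ∈ s <;> simp [hm]

-- B-state bookkeeping: A's (fields, current_key) is determined by B's reversed record list
def pvHeadKey (recs : List (List Char × List Char × List (List Char))) : Option (List Char) :=
  match recs with
  | [] => none
  | (k, _, _) :: _ => some k

-- A's incrementally re-stripped field value for one record
def pvIncFin (v : List Char) (cs : List (List Char)) : List Char :=
  cs.foldl (fun acc c => PySem.Chars.strip (acc ++ '\n' :: c)) v

def pvDictOf (recs : List (List Char × List Char × List (List Char))) :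
    PySem.Dict (List Char) (List Char) :=
  recs.reverse.foldl (fun d r => d.insert r.1 (pvIncFin r.2.1 r.2.2)) PySem.Dict.empty

def pvGood (recs : List (List Char × List Char × List (List Char))) : Prop :=
  ∀ r ∈ recs, ∀ c ∈ r.2.2, pvNice c

lemma pvIncFinAppend (v : List Char) (cs : List (List Char)) (c : List Char) :
    pvIncFin v (cs ++ [c]) = PySem.Chars.strip (pvIncFin v cs ++ '\n' :: c) := by
  simp [pvIncFin]

-- A's incremental strip equals B's single join-and-strip on nice continuations
lemma pvIncFinJoin (cs : List (List Char)) : ∀ (c0 v : List Char), pvNice c0 →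
    (∀ c ∈ cs, pvNice c) →
    pvIncFin v (c0 :: cs) =
      PySem.Chars.strip (v ++ '\n' :: PySem.Chars.join ['\n'] (c0 :: cs)) := by
  induction cs with
  | nil =>
    intro c0 v _ _
    simp [pvIncFin, PySem.Chars.join_singleton]
  | cons c1 cs' ih =>
    intro c0 v hc0 hcs
    have h1 : pvIncFin v (c0 :: c1 :: cs') =
        pvIncFin (PySem.Chars.strip (v ++ '\n' :: c0)) (c1 :: cs') := by
      simp [pvIncFin]
    rw [h1, ih c1 _ (hcs c1 (by simp)) (fun c hc => hcs c (by simp [hc])),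
      pvStripStripAppend v c0 _ hc0, PySem.Chars.join_cons_cons]
    simp

lemma pvIncFinEqJoinFin (v : List Char) (cs : List (List Char)) (h : ∀ c ∈ cs, pvNice c) :
    pvIncFin v cs = pvJoinFin v cs := by
  cases cs with
  | nil => simp [pvIncFin, pvJoinFin]
  | cons c0 cs' =>
    rw [pvJoinFin, if_neg (by simp),
      pvIncFinJoin cs' c0 v (h c0 (by simp)) (fun c hc => h c (by simp [hc]))]
    rw [PySem.Chars.join_cons_cons]
    congr 1
    simp

lemma pvDictOfCons (k v : List Char) (cs : List (List Char))
    (recs : List (List Char × List Char × List (List Char))) :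
    pvDictOf ((k, v, cs) :: recs) = (pvDictOf recs).insert k (pvIncFin v cs) := by
  simp [pvDictOf]

-- one step of the invariant
lemma pvStepInv (recs : List (List Char × List Char × List (List Char)))
    (h : pvGood recs) (l : List Char) :
    pvStepA (pvDictOf recs, pvHeadKey recs) l =
      (pvDictOf (pvStepB recs l), pvHeadKey (pvStepB recs l)) ∧ pvGood (pvStepB recs l) := by
  by_cases hh : (PySem.Chars.startswith (PySem.Chars.strip (PySem.Chars.rstrip l)) ['-', ' '] &&
      PySem.Chars.isIn [':'] (PySem.Chars.strip (PySem.Chars.rstrip l))) = true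
  · -- header line: A inserts the freshly parsed field, B starts a new record
    have hp := pvHeaderEq (PySem.List.slice (PySem.Chars.strip (PySem.Chars.rstrip l)) (some 2) none)
    have hB : pvStepB recs l =
        (PySem.Chars.lower (PySem.Chars.strip
            ((pvPartitionColon (PySem.List.slice (PySem.Chars.strip (PySem.Chars.rstrip l)) (some 2) none)).1)),
          pvCleanVal ((pvPartitionColon (PySem.List.slice (PySem.Chars.strip (PySem.Chars.rstrip l)) (some 2) none)).2.2),
          []) :: recs := by
      simp only [pvStepB, hh]
      rw [if_pos trivial]
    have hA : pvStepA (pvDictOf recs, pvHeadKey recs) l =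
        ((pvDictOf recs).insert (PySem.Chars.lower (PySem.Chars.strip
            ((PySem.Chars.splitOnMax (PySem.List.slice (PySem.Chars.strip (PySem.Chars.rstrip l)) (some 2) none) [':'] 1).headD [])))
          (pvCleanVal (((PySem.Chars.splitOnMax (PySem.List.slice (PySem.Chars.strip (PySem.Chars.rstrip l)) (some 2) none) [':'] 1).drop 1).headD [])),
          some (PySem.Chars.lower (PySem.Chars.strip
            ((PySem.Chars.splitOnMax (PySem.List.slice (PySem.Chars.strip (PySem.Chars.rstrip l)) (some 2) none) [':'] 1).headD [])))) := by
      simp only [pvStepA, hh]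
      rw [if_pos trivial]
    refine ⟨?_, ?_⟩
    · rw [hA, hB, pvDictOfCons]
      have h1 := congrArg Prod.fst hp
      have h2 := congrArg Prod.snd hp
      simp only at h1 h2
      rw [h1, h2]
      simp only [pvIncFin, List.foldl_nil, pvHeadKey]
    · rw [hB]
      intro r hr
      rcases List.mem_cons.mp hr with hr | hr
      · subst hr; intro c hc; simp at hc
      · exact h r hr
  · cases recs with
    | nil =>
      have hB : pvStepB [] l = [] := by
        simp only [pvStepB]
        rw [if_neg hh]
      have hA : pvStepA (pvDictOf [], pvHeadKey []) l = (pvDictOf [], pvHeadKey []) := by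
        simp only [pvStepA, pvHeadKey]
        rw [if_neg hh]
      refine ⟨by rw [hA, hB], by rw [hB]; exact h⟩
    | cons r rest =>
      obtain ⟨k, v, cs⟩ := r
      by_cases hcont : (k ≠ [] ∧
          PySem.Chars.startswith (PySem.Chars.rstrip l) [' ', ' '] = true ∧
          PySem.Chars.strip (PySem.Chars.rstrip l) ≠ [])
      · -- continuation line: A re-strips the stored value, B appends the stripped line
        have hnice : pvNice (PySem.Chars.strip (PySem.Chars.rstrip l)) :=
          pvNiceStrip _ hcont.2.2
        have hB : pvStepB ((k, v, cs) :: rest) l =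
            (k, v, cs ++ [PySem.Chars.strip (PySem.Chars.rstrip l)]) :: rest := by
          simp only [pvStepB]
          rw [if_neg hh, if_pos hcont]
        have hA : pvStepA (pvDictOf ((k, v, cs) :: rest), pvHeadKey ((k, v, cs) :: rest)) l =
            ((pvDictOf ((k, v, cs) :: rest)).insert k (PySem.Chars.strip
              ((pvDictOf ((k, v, cs) :: rest)).getD k [] ++ '\n' :: PySem.Chars.strip (PySem.Chars.rstrip l))),
              some k) := by
          simp only [pvStepA, pvHeadKey]
          rw [if_neg hh, if_pos hcont]
        refine ⟨?_, ?_⟩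
        · rw [hA, hB, pvDictOfCons, pvDictOfCons, PySem.Dict.getD_insert_self,
            PySem.Dict.insert_insert_self, ← pvIncFinAppend]
          rfl
        · rw [hB]
          intro r hr
          rcases List.mem_cons.mp hr with hr | hr
          · subst hr
            intro c hc
            rcases List.mem_append.mp hc with hc | hc
            · exact h (k, v, cs) (by simp) c hc
            · simp at hc; subst hc; exact hnice
          · exact h _ (by simp [hr])
      · have hB : pvStepB ((k, v, cs) :: rest) l = (k, v, cs) :: rest := by
          simp only [pvStepB]
          rw [if_neg hh, if_neg hcont]
        have hA : pvStepA (pvDictOf ((k, v, cs) :: rest), pvHeadKey ((k, v, cs) :: rest)) l =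
            (pvDictOf ((k, v, cs) :: rest), pvHeadKey ((k, v, cs) :: rest)) := by
          simp only [pvStepA, pvHeadKey]
          rw [if_neg hh, if_neg hcont]
        refine ⟨by rw [hA, hB], by rw [hB]; exact h⟩

-- the loop invariant: A's fold state is pvDictOf/pvHeadKey of B's fold state
lemma pvLoopInv (ls : List (List Char)) :
    ∀ (recs : List (List Char × List Char × List (List Char))), pvGood recs →
      (ls.foldl pvStepA (pvDictOf recs, pvHeadKey recs) =
        (pvDictOf (ls.foldl pvStepB recs), pvHeadKey (ls.foldl pvStepB recs))
      ∧ pvGood (ls.foldl pvStepB recs)) := by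
  induction ls with
  | nil => intro recs h; exact ⟨rfl, h⟩
  | cons l ls ih =>
    intro recs h
    have hstep := pvStepInv recs h l
    simp only [List.foldl_cons]
    rw [hstep.1]
    exact ih _ hstep.2

theorem pvMain (block : String) :
    parse_markdown_fields_py block = parse_markdown_fields_py_alt block := by
  have h0 : pvGood [] := by intro r hr; cases hr
  have hinv := pvLoopInv (PySem.Chars.splitlines block.toList) [] h0
  have hd0 : pvDictOf [] = PySem.Dict.empty := rfl
  have hk0 : pvHeadKey [] = none := rfl
  rw [hd0, hk0] at hinv
  show ((PySem.Chars.splitlines block.toList).foldl pvStepA (PySem.Dict.empty, none)).1.items.map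
      (fun p => (String.ofList p.1, String.ofList p.2)) =
    (((PySem.Chars.splitlines block.toList).foldl pvStepB []).reverse.foldl
        (fun d r => d.insert r.1 (pvJoinFin r.2.1 r.2.2)) PySem.Dict.empty).items.map
      (fun p => (String.ofList p.1, String.ofList p.2))
  rw [hinv.1]
  have hdict : pvDictOf ((PySem.Chars.splitlines block.toList).foldl pvStepB []) =
      (((PySem.Chars.splitlines block.toList).foldl pvStepB []).reverse.foldl
        (fun d r => d.insert r.1 (pvJoinFin r.2.1 r.2.2)) PySem.Dict.empty) := by
    rw [pvDictOf]
    refine PySem.List.foldl_congr_mem _ _ _ _ ?_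
    intro d r hr
    rw [pvIncFinEqJoinFin r.2.1 r.2.2 (hinv.2 r (List.mem_reverse.mp hr))]
  rw [hdict]

-- ===== VERDICT (by name: the statement is the Claim_ definition above) =====
theorem parse_markdown_fields_py_spec : Claim_equal_parse_markdown_fields_py := by
  intro block _
  unfold Spec_parse_markdown_fields_py
  exact pvMain block
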